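-- pv_equiv track=rewrite | github.com/daniel03c1/algorithms | kick start/training.py | min_train
-- ===== SOURCE A (Python) =====
-- def min_train(array:list, num_selected):
--     array.sort()
--     training_costs = []
--     subtotal = None
--
--     for i in range(-1, len(array) - num_selected):
--         # Like a sliding window,
--         # get subtotals of sorted array
--         if subtotal == None:
--             subtotal = sum(array[:num_selected])
--         else:
--             subtotal += array[num_selected+i] - array[i]
--
--         cost = array[num_selected+i] * num_selected - subtotal
--         training_costs.append(cost)
--
--     return min(training_costs)
-- ===== SOURCE B (Python) =====
-- def min_train(array: list, num_selected):
--     # prefix-sum table + direct per-window formula, instead of A's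
--     # None-sentinel incremental sliding subtotal
--     array.sort()
--     prefix = [0]
--     for x in array:
--         prefix.append(prefix[-1] + x)
--     costs = [array[j + num_selected - 1] * num_selected
--              - (prefix[j + num_selected] - prefix[j])
--              for j in range(len(array) - num_selected + 1)]
--     return min(costs)
-- ===== Notes on version B (the rewrite author's own statement) =====
-- stated objective: alternative
-- what changed: A maintains an incremental None-sentinel sliding subtotal inside one loop; B precomputes a prefix-sum table and then computes each window's cost directly with a closed formula in a second pass.
import Mathlib
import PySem

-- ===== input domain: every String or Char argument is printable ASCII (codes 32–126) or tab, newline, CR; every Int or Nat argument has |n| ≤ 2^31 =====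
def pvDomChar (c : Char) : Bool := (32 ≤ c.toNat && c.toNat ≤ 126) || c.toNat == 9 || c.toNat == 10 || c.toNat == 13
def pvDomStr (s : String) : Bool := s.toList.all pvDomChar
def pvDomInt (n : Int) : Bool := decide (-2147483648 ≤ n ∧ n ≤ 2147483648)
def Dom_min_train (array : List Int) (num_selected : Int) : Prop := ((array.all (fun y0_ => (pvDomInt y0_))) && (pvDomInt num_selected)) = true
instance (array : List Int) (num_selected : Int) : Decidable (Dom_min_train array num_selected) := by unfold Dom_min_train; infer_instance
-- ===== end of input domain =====

-- B replaces A's None-sentinel incremental sliding subtotal by a precomputed pfx-sum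
-- table and a direct per-window cost formula (alternative decomposition, same cost).
-- Both A and B sort the argument list in place; the equivalence proved is about the return value.


-- ===== PORT A =====
def min_train (array : List Int) (num_selected : Int) : Int :=
  let arr := PySem.List.sorted array (fun x => x) false
  let st :=
    (PySem.List.pyRange (-1) ((arr.length : Int) - num_selected) 1).foldl
      (fun (st : Option Int × List Int) i =>
        let subtotal :=
          match st.1 with
          | none => (PySem.List.slice arr none (some num_selected)).sum
          | some s => s + PySem.List.pyGetD arr (num_selected + i) 0 - PySem.List.pyGetD arr i 0
        (some subtotal,
         st.2 ++ [PySem.List.pyGetD arr (num_selected + i) 0 * num_selected - subtotal]))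
      (none, [])
  (PySem.List.min? st.2 (fun x => x)).getD 0

-- ===== PORT B =====
def min_train_alt (array : List Int) (num_selected : Int) : Int :=
  let arr := PySem.List.sorted array (fun x => x) false
  let pfx := arr.foldl (fun p x => p ++ [PySem.List.pyGetD p (-1) 0 + x]) [0]
  let costs :=
    (PySem.List.pyRange 0 ((arr.length : Int) - num_selected + 1) 1).map
      (fun j => PySem.List.pyGetD arr (j + num_selected - 1) 0 * num_selected -
                (PySem.List.pyGetD pfx (j + num_selected) 0 - PySem.List.pyGetD pfx j 0))
  (PySem.List.min? costs (fun x => x)).getD 0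

-- ===== PRECONDITION & SPEC =====
-- Pre_ excludes exactly the inputs on which A raises: an empty list (IndexError),
-- a negative num_selected (IndexError from the final array[i] access), and
-- num_selected > len(array) (ValueError: min of an empty sequence).
def Pre_min_train (array : List Int) (num_selected : Int) : Prop :=
  array ≠ [] ∧ 0 ≤ num_selected ∧ num_selected ≤ (array.length : Int)
instance (array : List Int) (num_selected : Int) : Decidable (Pre_min_train array num_selected) := by unfold Pre_min_train; infer_instance
def pvWitness_min_train : List Int × Int := ([3, 1, 2], 2)

def Spec_min_train (array : List Int) (num_selected : Int) (out : Int) : Prop := out = min_train_alt array num_selected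
instance (array : List Int) (num_selected : Int) (out : Int) : Decidable (Spec_min_train array num_selected out) := by unfold Spec_min_train; infer_instance

-- ===== CLAIM (what is proved, stated in full; the proofs are below) =====
def Claim_equal_min_train : Prop := ∀ (array : List Int) (num_selected : Int), Dom_min_train array num_selected → Pre_min_train array num_selected → Spec_min_train array num_selected (min_train array num_selected)

-- ===== LEMMAS AND PROOFS =====

-- running sum of the first k.toNat elements of arr
def prefixAt (arr : List Int) (k : Int) : Int := ((arr.take k.toNat).sum : Int)

-- the cost of the window whose last element is arr[n+i], indexed as in A's loop
def gcost (arr : List Int) (n : Int) (i : Int) : Int :=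
  PySem.List.pyGetD arr (n + i) 0 * n - (prefixAt arr (n + i + 1) - prefixAt arr (i + 1))

-- A's loop body, lambda-lifted (definitionally equal to the lambda in the port)
def Astep (arr : List Int) (n : Int) (st : Option Int × List Int) (i : Int) : Option Int × List Int :=
  let subtotal :=
    match st.1 with
    | none => (PySem.List.slice arr none (some n)).sum
    | some s => s + PySem.List.pyGetD arr (n + i) 0 - PySem.List.pyGetD arr i 0
  (some subtotal, st.2 ++ [PySem.List.pyGetD arr (n + i) 0 * n - subtotal])

theorem prefix_fold_eq (arr : List Int) :
    arr.foldl (fun p x => p ++ [PySem.List.pyGetD p (-1) 0 + x]) [0] =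
      (List.range (arr.length + 1)).map (fun k => ((arr.take k).sum : Int)) := by
  induction arr using List.reverseRecOn with
  | nil => simp [List.range_succ]
  | append_singleton xs x ih =>
    rw [List.foldl_append, ih]
    simp only [List.foldl_cons, List.foldl_nil]
    have hP : PySem.List.pyGetD ((List.range (xs.length + 1)).map (fun k => ((xs.take k).sum : Int))) (-1) 0 = xs.sum := by
      rw [PySem.List.pyGetD_neg_one _ _ (by simp)]
      rw [List.getLast_eq_getElem]
      simp
    rw [hP]
    conv_rhs => rw [show (xs ++ [x]).length + 1 = (xs.length + 1) + 1 by simp,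
      List.range_succ, List.map_append]
    congr 1
    · apply List.map_congr_left
      intro k hk
      rw [List.mem_range] at hk
      rw [List.take_append_of_le_length (by omega)]
    · have h2 : List.take (xs.length + 1) (xs ++ [x]) = xs ++ [x] := List.take_of_length_le (by simp)
      simp [h2]

theorem getD_eq_prefix_diff (arr : List Int) (i : Int) (h0 : 0 ≤ i) (hL : i < (arr.length : Int)) :
    PySem.List.pyGetD arr i 0 = prefixAt arr (i + 1) - prefixAt arr i := by
  unfold prefixAt
  rw [PySem.List.pyGetD_eq_getElem arr 0 h0 hL]
  have h1 : (i + 1).toNat = i.toNat + 1 := by omega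
  have h2 : i.toNat < arr.length := by omega
  rw [h1, List.sum_take_succ _ _ h2]
  ring

theorem A_fold_costs (arr : List Int) (n : Int) (hn : 0 ≤ n) :
    ∀ (m : Nat) (j : Int) (s : Int) (acc : List Int), 0 ≤ j → (m : Int) = (arr.length : Int) - n - j →
      s = prefixAt arr (n + j) - prefixAt arr j →
      ((PySem.List.pyRange j ((arr.length : Int) - n) 1).foldl (Astep arr n) (some s, acc)).2
        = acc ++ (PySem.List.pyRange j ((arr.length : Int) - n) 1).map (gcost arr n) := by
  intro m
  induction m with
  | zero =>
    intro j s acc hj hm hs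
    rw [PySem.List.pyRange_one_eq_nil (by omega)]
    simp
  | succ m ih =>
    intro j s acc hj hm hs
    rw [PySem.List.pyRange_one_cons (by omega)]
    rw [List.foldl_cons, List.map_cons]
    have hs' : s + PySem.List.pyGetD arr (n + j) 0 - PySem.List.pyGetD arr j 0
        = prefixAt arr (n + j + 1) - prefixAt arr (j + 1) := by
      rw [hs, getD_eq_prefix_diff arr (n + j) (by omega) (by omega),
          getD_eq_prefix_diff arr j hj (by omega)]
      ring
    have hstep : Astep arr n (some s, acc) j =
        (some (prefixAt arr (n + j + 1) - prefixAt arr (j + 1)), acc ++ [gcost arr n j]) := by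
      simp only [Astep, gcost]
      rw [hs']
    have hs2 : prefixAt arr (n + j + 1) - prefixAt arr (j + 1)
        = prefixAt arr (n + (j + 1)) - prefixAt arr (j + 1) := by
      rw [show n + (j + 1) = n + j + 1 by ring]
    rw [hstep, ih (j + 1) _ _ (by omega) (by omega) hs2]
    simp

-- ===== VERDICT (by name: the statement is the Claim_ definition above) =====
theorem min_train_spec : Claim_equal_min_train := by
  intro array n _hdom hpre
  obtain ⟨hne, hn, hnL⟩ := hpre
  unfold Spec_min_train min_train min_train_alt
  simp only []
  set arr := PySem.List.sorted array (fun x => x) false with harr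
  have hLs : arr.length = array.length := PySem.List.length_sorted array (fun x => x) false
  have hL : n ≤ (arr.length : Int) := by rw [hLs]; exact hnL
  have hpos : 0 < arr.length := by
    rw [hLs]; cases array with
    | nil => exact absurd rfl hne
    | cons a t => simp
  -- name A's loop body
  rw [show (fun (st : Option Int × List Int) i =>
        let subtotal :=
          match st.1 with
          | none => (PySem.List.slice arr none (some n)).sum
          | some s => s + PySem.List.pyGetD arr (n + i) 0 - PySem.List.pyGetD arr i 0
        (some subtotal,
         st.2 ++ [PySem.List.pyGetD arr (n + i) 0 * n - subtotal])) = Astep arr n from rfl]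
  -- peel off A's first iteration (i = -1)
  have hcons : PySem.List.pyRange (-1) ((arr.length : Int) - n) 1
      = -1 :: PySem.List.pyRange 0 ((arr.length : Int) - n) 1 := by
    rw [PySem.List.pyRange_one_cons (by omega)]; norm_num
  have hstep0 : Astep arr n (none, []) (-1) = (some (prefixAt arr n), [gcost arr n (-1)]) := by
    simp only [Astep, gcost]
    rw [PySem.List.slice_to arr hn]
    rw [show n + -1 + 1 = n by ring, show (-1 : Int) + 1 = 0 by ring]
    simp [prefixAt]
  have hA : ((PySem.List.pyRange (-1) ((arr.length : Int) - n) 1).foldl (Astep arr n) (none, [])).2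
      = (PySem.List.pyRange (-1) ((arr.length : Int) - n) 1).map (gcost arr n) := by
    rw [hcons, List.foldl_cons, List.map_cons, hstep0]
    rw [A_fold_costs arr n hn ((arr.length : Int) - n).toNat 0 _ _ le_rfl (by omega)
        (by simp [prefixAt])]
    simp
  -- B's prefix table is the table of take-sums
  rw [prefix_fold_eq arr]
  -- reading B's table at K gives prefixAt K
  have hpfx : ∀ K : Int, 0 ≤ K → K ≤ (arr.length : Int) →
      PySem.List.pyGetD ((List.range (arr.length + 1)).map (fun k => ((arr.take k).sum : Int))) K 0
        = prefixAt arr K := by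
    intro K h0 hK
    rw [PySem.List.pyGetD_eq_getElem _ 0 h0 (by simp; omega)]
    simp [prefixAt]
  -- B's comprehension is A's cost list, window by window (j = i + 1)
  have hB : (PySem.List.pyRange 0 ((arr.length : Int) - n + 1) 1).map
      (fun j => PySem.List.pyGetD arr (j + n - 1) 0 * n -
        (PySem.List.pyGetD ((List.range (arr.length + 1)).map (fun k => ((arr.take k).sum : Int))) (j + n) 0
          - PySem.List.pyGetD ((List.range (arr.length + 1)).map (fun k => ((arr.take k).sum : Int))) j 0))
      = (PySem.List.pyRange (-1) ((arr.length : Int) - n) 1).map (gcost arr n) := by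
    rw [PySem.List.pyRange_one, PySem.List.pyRange_one, List.map_map, List.map_map]
    rw [show ((arr.length : Int) - n - (-1)).toNat = ((arr.length : Int) - n + 1 - 0).toNat by omega]
    apply List.map_congr_left
    intro k hk
    rw [List.mem_range] at hk
    have hk' : (k : Int) ≤ (arr.length : Int) - n := by omega
    simp only [Function.comp]
    rw [hpfx ((0 + (k : Int)) + n) (by omega) (by omega), hpfx (0 + (k : Int)) (by omega) (by omega)]
    unfold gcost
    rw [show n + (-1 + (k : Int)) = 0 + (k : Int) + n - 1 by ring]
    rw [show (0 : Int) + (k : Int) + n - 1 + 1 = 0 + (k : Int) + n by ring,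
        show (-1 : Int) + (k : Int) + 1 = 0 + (k : Int) by ring]
  rw [hA, hB]
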